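-- pv_equiv track=rewrite | github.com/oduwsdl/sumgram | sumgram/util.py | isMatchInOrder
-- ===== SOURCE A (Python) =====
-- def isMatchInOrder(keyLst, parentLst):
--
--     if( len(keyLst) < 2 or len(parentLst) == 0 ):
--         return False
--
--     indices = []
--     for key in keyLst:
--
--         if( key not in parentLst ):
--             continue
--
--         indx = parentLst.index(key)
--         indices.append(indx)
--
--     if( sorted(indices) == indices ):
--         return True
--     else:
--         return False
-- ===== SOURCE B (Python) =====
-- def isMatchInOrder(keyLst, parentLst):
--
--     if( len(keyLst) < 2 or len(parentLst) == 0 ):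
--         return False
--
--     pos = {}
--     for i, tok in enumerate(parentLst):
--         pos.setdefault(tok, i)
--
--     prev = -1
--     for key in keyLst:
--         idx = pos.get(key)
--         if idx is None:
--             continue
--         if idx < prev:
--             return False
--         prev = idx
--
--     return True
-- ===== Notes on version B (the rewrite author's own statement) =====
-- stated objective: faster
-- what changed: Replaces the collect-all-indices-then-sort-and-compare strategy with a first-occurrence hash index built once over parentLst plus a single early-exit monotonicity scan over keyLst, eliminating the per-key membership test, the per-key linear .index scan and the final sort.
import Mathlib
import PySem

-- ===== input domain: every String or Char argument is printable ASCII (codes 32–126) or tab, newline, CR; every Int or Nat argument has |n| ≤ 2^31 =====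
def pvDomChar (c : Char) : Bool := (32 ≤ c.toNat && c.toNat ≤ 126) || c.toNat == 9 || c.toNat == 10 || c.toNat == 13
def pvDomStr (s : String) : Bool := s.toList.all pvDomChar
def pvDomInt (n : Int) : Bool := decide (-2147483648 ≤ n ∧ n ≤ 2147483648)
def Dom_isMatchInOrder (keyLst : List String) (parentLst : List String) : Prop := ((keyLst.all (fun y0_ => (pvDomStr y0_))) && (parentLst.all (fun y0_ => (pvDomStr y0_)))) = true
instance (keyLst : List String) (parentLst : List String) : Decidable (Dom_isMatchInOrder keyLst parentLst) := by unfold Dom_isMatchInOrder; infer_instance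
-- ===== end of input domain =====

-- B replaces A's collect-all-indices-then-sort-and-compare strategy by a first-occurrence
-- index dict built once plus a single early-exit monotonicity scan (faster).

-- ===== PORT A =====
def isMatchInOrder (keyLst : List String) (parentLst : List String) : Bool :=
  if keyLst.length < 2 ∨ parentLst.length = 0 then false
  else
    let indices : List Int := keyLst.foldl (fun acc key =>
      if ¬ parentLst.contains key then acc
      else
        match PySem.List.index? parentLst key with
        | some i => acc ++ [(i : Int)]
        | none => acc) []
    if PySem.List.sorted indices (fun x => x) false = indices then true else false

-- ===== PORT B =====
def pvFirstPos (parentLst : List String) : PySem.Dict String Int :=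
  (PySem.List.enumerate parentLst 0).foldl (fun d p => d.setdefault p.2 p.1) PySem.Dict.empty

def pvScan (pos : PySem.Dict String Int) : List String → Int → Bool
  | [], _ => true
  | key :: rest, prev =>
    match pos.get? key with
    | none => pvScan pos rest prev
    | some idx => if idx < prev then false else pvScan pos rest idx

def isMatchInOrder_alt (keyLst : List String) (parentLst : List String) : Bool :=
  if keyLst.length < 2 ∨ parentLst.length = 0 then false
  else pvScan (pvFirstPos parentLst) keyLst (-1)

-- ===== PRECONDITION & SPEC =====
def Spec_isMatchInOrder (keyLst : List String) (parentLst : List String) (out : Bool) : Prop := out = isMatchInOrder_alt keyLst parentLst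
instance (keyLst : List String) (parentLst : List String) (out : Bool) : Decidable (Spec_isMatchInOrder keyLst parentLst out) := by unfold Spec_isMatchInOrder; infer_instance

-- ===== CLAIM (what is proved, stated in full; the proofs are below) =====
def Claim_equal_isMatchInOrder : Prop := ∀ (keyLst : List String) (parentLst : List String), Dom_isMatchInOrder keyLst parentLst → Spec_isMatchInOrder keyLst parentLst (isMatchInOrder keyLst parentLst)

-- ===== LEMMAS AND PROOFS =====

-- the first-occurrence index of key in parentLst, as A computes it per key
def pvIdx (parentLst : List String) (key : String) : Option Int :=
  Option.map (fun n : Nat => (n : Int)) (PySem.List.index? parentLst key)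

-- the first-occurrence dict looks up exactly parentLst.index (first match)
theorem pvFirstPos_get?_aux (k : String) :
    ∀ (xs : List String) (s : Int) (d : PySem.Dict String Int),
      ((PySem.List.enumerate xs s).foldl (fun d p => d.setdefault p.2 p.1) d).get? k =
        match d.get? k with
        | some v => some v
        | none => Option.map (fun n : Nat => (n : Int) + s) (PySem.List.index? xs k) := by
  intro xs
  induction xs with
  | nil => intro s d; cases h : d.get? k <;> simp [PySem.List.enumerate_nil, h, PySem.List.index?_eq_idxOf?]
  | cons x xs ih =>
    intro s d
    rw [PySem.List.enumerate_cons]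
    simp only [List.foldl_cons]
    by_cases hc : d.contains x = true
    · rw [PySem.Dict.setdefault_of_contains d s hc, ih]
      by_cases hkx : x = k
      · subst hkx
        have hs : (d.get? x).isSome := by rw [← PySem.Dict.contains_eq_isSome_get?]; exact hc
        cases h : d.get? x with
        | none => rw [h] at hs; simp at hs
        | some v => simp
      · rw [PySem.List.index?_cons_of_ne xs hkx]
        cases h : d.get? k with
        | some v => simp
        | none =>
          simp only [Option.map_map]
          congr 1; funext n; simp [Function.comp]; ring
    · have hc' : d.contains x = false := by
        cases hcc : d.contains x
        · rfl
        · exact absurd hcc hc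
      rw [PySem.Dict.setdefault_of_not_contains d s hc', ih]
      have hdx : d.get? x = none := by
        have hcd := PySem.Dict.contains_eq_isSome_get? (d := d) (k := x)
        rw [hc'] at hcd
        cases h : d.get? x with
        | none => rfl
        | some v => rw [h] at hcd; simp at hcd
      by_cases hkx : x = k
      · subst hkx
        rw [PySem.Dict.get?_insert_self, hdx, PySem.List.index?_cons_self x xs]
        simp
      · rw [PySem.Dict.get?_insert_of_ne d s (Ne.symm hkx), PySem.List.index?_cons_of_ne xs hkx]
        cases h : d.get? k with
        | some v => simp
        | none =>
          simp only [Option.map_map]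
          congr 1; funext n; simp [Function.comp]; ring

theorem pvFirstPos_get? (parentLst : List String) (k : String) :
    (pvFirstPos parentLst).get? k = pvIdx parentLst k := by
  rw [pvFirstPos, pvFirstPos_get?_aux, pvIdx]
  simp [PySem.Dict.get?_empty]

-- A's accumulation loop is the filterMap of first-occurrence indices
theorem indicesLoop_eq_filterMap (parentLst : List String) :
    ∀ (ks : List String) (acc : List Int),
      ks.foldl (fun acc key =>
        if ¬ parentLst.contains key then acc
        else
          match PySem.List.index? parentLst key with
          | some i => acc ++ [(i : Int)]
          | none => acc) acc =
      acc ++ ks.filterMap (pvIdx parentLst) := by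
  intro ks
  induction ks with
  | nil => intro acc; simp
  | cons key ks ih =>
    intro acc
    simp only [List.foldl_cons, List.filterMap_cons]
    by_cases hm : key ∈ parentLst
    · have hc : parentLst.contains key = true := by simpa using hm
      have hs : (PySem.List.index? parentLst key).isSome := by
        rw [PySem.List.index?_isSome_iff]; exact hm
      cases h : PySem.List.index? parentLst key with
      | none => rw [h] at hs; simp at hs
      | some i =>
        rw [if_neg (by simpa using hm), ih]
        simp only [pvIdx, h, Option.map_some]
        simp
    · have hc : parentLst.contains key = false := by simpa using hm
      have h : PySem.List.index? parentLst key = none := by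
        rw [PySem.List.index?_eq_none_iff]; exact hm
      rw [if_pos (by simpa using hm), ih]
      simp only [pvIdx, h, Option.map_none]

-- B's scan decides the chain condition from prev
theorem pvScan_eq_chain (pos : PySem.Dict String Int) :
    ∀ (ks : List String) (prev : Int),
      pvScan pos ks prev = true ↔ List.IsChain (· ≤ ·) (prev :: ks.filterMap pos.get?) := by
  intro ks
  induction ks with
  | nil => intro prev; simp [pvScan]
  | cons key ks ih =>
    intro prev
    simp only [pvScan, List.filterMap_cons]
    cases h : pos.get? key with
    | none => rw [ih prev]
    | some idx =>
      by_cases hlt : idx < prev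
      · simp only [if_pos hlt]
        constructor
        · intro hf; simp at hf
        · intro hch
          have := (List.isChain_cons_cons.mp hch).1
          omega
      · simp only [if_neg hlt, List.isChain_cons_cons]
        rw [ih idx]
        constructor
        · intro hch; exact ⟨by omega, hch⟩
        · intro hch; exact hch.2

-- sorted(indices) == indices iff indices is non-decreasing
theorem sorted_eq_self_iff_pairwise (l : List Int) :
    PySem.List.sorted l (fun x => x) false = l ↔ l.Pairwise (· ≤ ·) := by
  constructor
  · intro h
    have hp := PySem.List.sorted_pairwise (xs := l) (key := fun x => x)
    rw [h] at hp
    exact hp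
  · intro h
    exact PySem.List.sorted_eq_self_of_pairwise l (fun x => x) h

-- elements produced by parentLst.index are nonnegative
theorem mem_indices_nonneg (parentLst : List String) (ks : List String) (x : Int)
    (hx : x ∈ ks.filterMap (pvIdx parentLst)) : 0 ≤ x := by
  rcases List.mem_filterMap.mp hx with ⟨key, _, h⟩
  rw [pvIdx] at h
  rcases Option.map_eq_some_iff.mp h with ⟨n, _, rfl⟩
  exact Int.natCast_nonneg n

-- ===== VERDICT (by name: the statement is the Claim_ definition above) =====
theorem isMatchInOrder_spec : Claim_equal_isMatchInOrder := by
  intro keyLst parentLst _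
  unfold Spec_isMatchInOrder isMatchInOrder isMatchInOrder_alt
  by_cases hg : keyLst.length < 2 ∨ parentLst.length = 0
  · rw [if_pos hg, if_pos hg]
  · rw [if_neg hg, if_neg hg]
    set L := keyLst.filterMap (pvIdx parentLst) with hL
    have hfm : keyLst.filterMap (pvFirstPos parentLst).get? = L := by
      rw [hL]; exact List.filterMap_congr (fun k _ => pvFirstPos_get? parentLst k)
    rw [indicesLoop_eq_filterMap, List.nil_append]
    have hscan := pvScan_eq_chain (pvFirstPos parentLst) keyLst (-1)
    rw [hfm] at hscan
    have hchain : List.IsChain (· ≤ ·) ((-1 : Int) :: L) ↔ L.Pairwise (· ≤ ·) := by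
      rw [List.isChain_cons]
      constructor
      · intro hh
        exact List.IsChain.pairwise hh.2
      · intro h
        refine ⟨?_, h.isChain⟩
        intro y hy
        have h0 : 0 ≤ y := mem_indices_nonneg parentLst keyLst y (List.mem_of_mem_head? hy)
        omega
    by_cases hp : L.Pairwise (· ≤ ·)
    · rw [if_pos ((sorted_eq_self_iff_pairwise L).mpr hp)]
      exact (hscan.mpr (hchain.mpr hp)).symm
    · rw [if_neg (fun h => hp ((sorted_eq_self_iff_pairwise L).mp h))]
      cases hb : pvScan (pvFirstPos parentLst) keyLst (-1)
      · rfl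
      · exact absurd (hchain.mp (hscan.mp hb)) hp
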